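-- pv_equiv track=rewrite | github.com/lam114841-design/237480201078_17DCNTT2_Python | BT_Chuong4/Bai16.py | tim_gia_tri_xa_nhat
-- ===== SOURCE A (Python) =====
-- def tim_gia_tri_xa_nhat(L, x):
--     """
--     Hàm tìm giá trị trong list L xa x nhất.
--     Xa nhất nghĩa là |giá trị - x| lớn nhất.
--     """
--     gia_tri_xa_nhat = L[0]
--     do_lech_lon_nhat = abs(L[0] - x)
--
--     for so in L[1:]:
--         do_lech = abs(so - x)
--         if do_lech > do_lech_lon_nhat:
--             do_lech_lon_nhat = do_lech
--             gia_tri_xa_nhat = so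
--
--     return gia_tri_xa_nhat
-- ===== SOURCE B (Python) =====
-- def tim_gia_tri_xa_nhat(L, x):
--     devs = [abs(s - x) for s in L]
--     m = max(devs)
--     return L[devs.index(m)]
-- ===== Notes on version B (the rewrite author's own statement) =====
-- stated objective: alternative
-- what changed: Replaces A's fused running-argmax loop with a deviation table built once, then max() and devs.index() to locate the first farthest element.
import Mathlib
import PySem

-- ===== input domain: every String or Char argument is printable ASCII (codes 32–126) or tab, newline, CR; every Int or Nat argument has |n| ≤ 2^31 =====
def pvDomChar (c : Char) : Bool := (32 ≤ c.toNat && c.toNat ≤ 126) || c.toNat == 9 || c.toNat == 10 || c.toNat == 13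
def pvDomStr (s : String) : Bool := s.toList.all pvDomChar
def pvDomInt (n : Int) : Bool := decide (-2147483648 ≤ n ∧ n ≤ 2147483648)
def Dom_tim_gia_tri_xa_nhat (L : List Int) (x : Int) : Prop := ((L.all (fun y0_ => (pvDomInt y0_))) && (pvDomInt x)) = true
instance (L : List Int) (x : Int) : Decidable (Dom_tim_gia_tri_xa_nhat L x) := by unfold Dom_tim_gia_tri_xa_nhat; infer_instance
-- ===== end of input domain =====

-- B replaces A's fused running-argmax loop by a deviation table plus max-then-locate (alternative decomposition, same cost).

-- ===== PORT A =====
def tim_gia_tri_xa_nhat (L : List Int) (x : Int) : Int :=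
  match PySem.List.pyGet? L 0 with
  | none => 0  -- L[0] raises IndexError on []; excluded by Pre_
  | some g0 =>
    (((PySem.List.slice L (some 1) none)).foldl
      (fun (st : Int × Int) so =>
        let do_lech := |so - x|
        if do_lech > st.2 then (so, do_lech) else st)
      (g0, |g0 - x|)).1

-- ===== PORT B =====
-- B-side helper: L[i] for the Nat index returned by devs.index(m) (in range whenever it is reached)
def pvElemAt (L : List Int) (o : Option Nat) : Int :=
  match o with
  | none => 0
  | some i => (PySem.List.pyGet? L (i : Int)).getD 0

def tim_gia_tri_xa_nhat_alt (L : List Int) (x : Int) : Int :=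
  let devs := L.map (fun s => |s - x|)
  match PySem.List.max? devs (fun y => y) with
  | none => 0  -- max([]) raises ValueError; excluded by Pre_
  | some m => pvElemAt L (PySem.List.index? devs m)

-- ===== PRECONDITION & SPEC =====
-- Pre_: the list is nonempty (A raises IndexError on [], B raises ValueError there).
def Pre_tim_gia_tri_xa_nhat (L : List Int) (x : Int) : Prop := L ≠ []
instance (L : List Int) (x : Int) : Decidable (Pre_tim_gia_tri_xa_nhat L x) := by unfold Pre_tim_gia_tri_xa_nhat; infer_instance
def pvWitness_tim_gia_tri_xa_nhat : List Int × Int := ([3, -5, 4], 1)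

def Spec_tim_gia_tri_xa_nhat (L : List Int) (x : Int) (out : Int) : Prop := out = tim_gia_tri_xa_nhat_alt L x
instance (L : List Int) (x : Int) (out : Int) : Decidable (Spec_tim_gia_tri_xa_nhat L x out) := by unfold Spec_tim_gia_tri_xa_nhat; infer_instance

-- ===== CLAIM (what is proved, stated in full; the proofs are below) =====
def Claim_equal_tim_gia_tri_xa_nhat : Prop := ∀ (L : List Int) (x : Int), Dom_tim_gia_tri_xa_nhat L x → Pre_tim_gia_tri_xa_nhat L x → Spec_tim_gia_tri_xa_nhat L x (tim_gia_tri_xa_nhat L x)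

-- ===== LEMMAS AND PROOFS =====

lemma pvElemAt_cons (h : Int) (L : List Int) (o : Option Nat) :
    pvElemAt (h :: L) (o.map (· + 1)) = pvElemAt L o := by
  cases o with
  | none => rfl
  | some j =>
    simp only [Option.map_some, pvElemAt]
    have : ((j + 1 : Nat) : Int) = (j : Int) + 1 := by push_cast; ring
    rw [this, PySem.List.pyGet?_cons_succ]

lemma core (x : Int) (t : List Int) : ∀ (h : Int),
    pvElemAt (h :: t)
      (PySem.List.index? ((h :: t).map (fun s => |s - x|))
        ((t.map (fun s => |s - x|)).foldl max (|h - x|)))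
    = (t.foldl
        (fun (st : Int × Int) so =>
          let do_lech := |so - x|
          if do_lech > st.2 then (so, do_lech) else st)
        (h, |h - x|)).1 := by
  induction t with
  | nil =>
    intro h
    simp only [List.map_nil, List.foldl_nil, List.map_cons]
    rw [PySem.List.index?_cons_self]
    simp [pvElemAt]
  | cons a t' ih =>
    intro h
    simp only [List.map_cons, List.foldl_cons]
    by_cases hc : |a - x| > |h - x|
    · -- new max taken: first list element can never be the max
      have hmax : max (|h - x|) (|a - x|) = |a - x| := max_eq_right (le_of_lt hc)
      rw [hmax]
      have hle : |a - x| ≤ (t'.map (fun s => |s - x|)).foldl max (|a - x|) :=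
        (PySem.List.le_foldl_max _ _).1
      have hne : |h - x| ≠ (t'.map (fun s => |s - x|)).foldl max (|a - x|) := by
        intro he; omega
      rw [PySem.List.index?_cons_of_ne _ hne, pvElemAt_cons]
      have := ih a
      simp only [List.map_cons] at this
      rw [this]
      simp [hc]
    · -- old max kept
      have hac : |a - x| ≤ |h - x| := le_of_not_gt hc
      have hmax : max (|h - x|) (|a - x|) = |h - x| := max_eq_left hac
      rw [hmax]
      simp only [hc, if_false, gt_iff_lt]
      set m := (t'.map (fun s => |s - x|)).foldl max (|h - x|) with hm
      have hhm : |h - x| ≤ m := (PySem.List.le_foldl_max _ _).1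
      by_cases he : m = |h - x|
      · -- the head is the (first) max in both lists
        rw [he, PySem.List.index?_cons_self]
        have := ih h
        simp only [List.map_cons, ← hm, he] at this
        rw [PySem.List.index?_cons_self] at this
        simp only [pvElemAt, Nat.cast_zero, PySem.List.pyGet?_zero_cons, Option.getD_some] at this ⊢
        exact this
      · -- the max is strictly inside the tail in both lists
        have hne1 : |h - x| ≠ m := fun hx => he hx.symm
        have hne2 : |a - x| ≠ m := by
          intro hx; omega
        rw [PySem.List.index?_cons_of_ne _ hne1, PySem.List.index?_cons_of_ne _ hne2,
          pvElemAt_cons, pvElemAt_cons]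
        have := ih h
        simp only [List.map_cons, ← hm] at this
        rw [PySem.List.index?_cons_of_ne _ hne1, pvElemAt_cons] at this
        exact this

-- ===== VERDICT (by name: the statement is the Claim_ definition above) =====
theorem tim_gia_tri_xa_nhat_spec : Claim_equal_tim_gia_tri_xa_nhat := by
  intro L x _ hpre
  cases L with
  | nil => exact absurd rfl hpre
  | cons h t =>
    unfold Spec_tim_gia_tri_xa_nhat tim_gia_tri_xa_nhat tim_gia_tri_xa_nhat_alt
    simp only [List.map_cons]
    rw [PySem.List.max?_id_cons]
    simp only [PySem.List.pyGet?_zero_cons, PySem.List.slice_from_one, List.tail_cons]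
    have := core x t h
    simp only [List.map_cons] at this
    exact this.symm
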